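-- pv_equiv track=rewrite | github.com/najkire/advent2020 | day11/day11-1.py | sweep_grid
-- ===== SOURCE A (Python) =====
-- def get_occupied_seats(grid, x, y):
--     seats = ''
--     for row in grid[max(0, y - 1):min(y + 2, len(grid))]:
--         seats += row[max(0, x - 1):min(x + 2, len(row))]
--
--     return sum(s == '#' for s in seats)
--
-- def sweep_grid(grid):
--     new_grid = []
--     for y, row in enumerate(grid):
--         new_row = ''
--         for x, seat in enumerate(row):
--             occupied_seats = get_occupied_seats(grid, x, y)
--             if seat == 'L' and not occupied_seats:
--                 new_row += '#'
--                 continue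
--             if seat == '#' and occupied_seats > 4:
--                 new_row += 'L'
--                 continue
--             new_row += seat
--
--         new_grid += [new_row]
--
--     return new_grid
-- ===== SOURCE B (Python) =====
-- def sweep_grid(grid):
--     # Per-row prefix sums of '#' counts; each neighbourhood count becomes O(1)
--     # index arithmetic instead of repeated string slicing and scanning.
--     pref = []
--     for row in grid:
--         p = [0]
--         s = 0
--         for c in row:
--             s += c == '#'
--             p.append(s)
--         pref.append(p)
--     n = len(grid)
--
--     def occ(x, y):
--         total = 0
--         for r in range(max(0, y - 1), min(y + 2, n)):
--             p = pref[r]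
--             lo = max(0, x - 1)
--             hi = min(x + 2, len(p) - 1)
--             if lo < hi:
--                 total += p[hi] - p[lo]
--         return total
--
--     out = []
--     for y, row in enumerate(grid):
--         chars = []
--         for x, seat in enumerate(row):
--             o = occ(x, y)
--             if seat == 'L' and o == 0:
--                 chars.append('#')
--             elif seat == '#' and o > 4:
--                 chars.append('L')
--             else:
--                 chars.append(seat)
--         out.append(''.join(chars))
--     return out
-- ===== Notes on version B (the rewrite author's own statement) =====
-- stated objective: alternative
-- what changed: Replaces the per-cell string-slice-and-scan neighbourhood count with per-row prefix-sum tables queried by O(1) index arithmetic (works on ragged grids because each row keeps its own table).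
import Mathlib
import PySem

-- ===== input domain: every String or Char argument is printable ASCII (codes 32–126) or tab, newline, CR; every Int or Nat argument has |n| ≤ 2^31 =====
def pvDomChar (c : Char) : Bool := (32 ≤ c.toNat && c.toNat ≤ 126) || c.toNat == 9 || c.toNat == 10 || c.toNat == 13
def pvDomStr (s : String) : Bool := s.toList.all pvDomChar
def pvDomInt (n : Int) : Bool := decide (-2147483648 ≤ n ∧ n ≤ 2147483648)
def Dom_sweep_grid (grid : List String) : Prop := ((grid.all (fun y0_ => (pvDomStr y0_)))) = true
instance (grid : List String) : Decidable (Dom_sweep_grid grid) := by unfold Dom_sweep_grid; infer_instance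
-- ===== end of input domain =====

-- B replaces A's per-cell string slicing and scanning with per-row prefix-sum tables queried
-- by index arithmetic (alternative decomposition, same asymptotics). Return values only.

-- ===== PORT A =====
def get_occupied_seats (grid : List String) (x y : Int) : Int :=
  let seats : List Char :=
    (PySem.List.slice grid (some (max 0 (y - 1))) (some (min (y + 2) (grid.length : Int)))).foldl
      (fun seats row =>
        seats ++ PySem.List.slice row.toList (some (max 0 (x - 1))) (some (min (x + 2) (row.toList.length : Int)))) []
  seats.foldl (fun acc s => acc + (if s == '#' then 1 else 0)) 0

def sweep_grid (grid : List String) : List String :=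
  (PySem.List.enumerate grid 0).foldl (fun new_grid yr =>
    let new_row : List Char :=
      (PySem.List.enumerate yr.2.toList 0).foldl (fun new_row xs =>
        let occupied_seats := get_occupied_seats grid xs.1 yr.1
        if xs.2 == 'L' && occupied_seats == 0 then new_row ++ ['#']
        else if xs.2 == '#' && decide (occupied_seats > 4) then new_row ++ ['L']
        else new_row ++ [xs.2]) []
    new_grid ++ [String.ofList new_row]) []

-- ===== PORT B =====
def pvPrefixRow (row : List Char) : List Int :=
  (row.foldl (fun (ps : List Int × Int) c =>
      let s := ps.2 + (if c == '#' then 1 else 0)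
      (ps.1 ++ [s], s)) ([0], 0)).1

def pvOcc (pref : List (List Int)) (n x y : Int) : Int :=
  (PySem.List.pyRange (max 0 (y - 1)) (min (y + 2) n) 1).foldl (fun total r =>
    let p := PySem.List.pyGetD pref r []
    let lo := max 0 (x - 1)
    let hi := min (x + 2) ((p.length : Int) - 1)
    if lo < hi then total + (PySem.List.pyGetD p hi 0 - PySem.List.pyGetD p lo 0) else total) 0

def sweep_grid_alt (grid : List String) : List String :=
  let pref := grid.foldl (fun pref row => pref ++ [pvPrefixRow row.toList]) []
  let n : Int := grid.length
  (PySem.List.enumerate grid 0).foldl (fun out yr =>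
    let chars : List Char :=
      (PySem.List.enumerate yr.2.toList 0).foldl (fun chars xs =>
        let o := pvOcc pref n xs.1 yr.1
        if xs.2 == 'L' && o == 0 then chars ++ ['#']
        else if xs.2 == '#' && decide (o > 4) then chars ++ ['L']
        else chars ++ [xs.2]) []
    out ++ [String.ofList chars]) []

-- ===== PRECONDITION & SPEC =====
def Spec_sweep_grid (grid : List String) (out : List String) : Prop := out = sweep_grid_alt grid
instance (grid : List String) (out : List String) : Decidable (Spec_sweep_grid grid out) := by unfold Spec_sweep_grid; infer_instance

-- ===== CLAIM (what is proved, stated in full; the proofs are below) =====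
def Claim_equal_sweep_grid : Prop := ∀ (grid : List String), Dom_sweep_grid grid → Spec_sweep_grid grid (sweep_grid grid)

-- ===== LEMMAS AND PROOFS =====

-- '#'-count of a character list, as an Int (proof-side abbreviation)
def pvCnt (l : List Char) : Int := (l.countP (fun c => c == '#') : Int)

-- the list of per-row prefix tables that B's first loop builds
def pvPrefList (grid : List String) : List (List Int) :=
  grid.map (fun row => pvPrefixRow row.toList)

-- invariant of B's prefix-building loop
theorem pvPfx_aux (row : List Char) : ∀ (ps : List Int) (s : Int),
    row.foldl (fun (ps : List Int × Int) c =>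
      let s := ps.2 + (if c == '#' then 1 else 0)
      (ps.1 ++ [s], s)) (ps, s)
    = (ps ++ (List.range row.length).map (fun j => s + pvCnt (row.take (j + 1))), s + pvCnt row) := by
  induction row with
  | nil => intro ps s; simp [pvCnt]
  | cons c cs ih =>
    intro ps s
    simp only [List.foldl_cons]
    rw [ih]
    apply Prod.ext
    · simp only [List.length_cons, List.range_succ_eq_map, List.map_cons, List.map_map,
        List.append_assoc, List.singleton_append, List.append_right_inj, List.cons.injEq]
      refine ⟨by simp [pvCnt], List.map_congr_left ?_⟩
      intro j hj
      simp only [Function.comp, pvCnt, List.take_succ_cons, List.countP_cons]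
      split <;> push_cast <;> ring
    · simp [pvCnt, List.countP_cons]; split <;> omega

theorem pvPrefixRow_eq (row : List Char) :
    pvPrefixRow row = (List.range (row.length + 1)).map (fun j => pvCnt (row.take j)) := by
  rw [pvPrefixRow, pvPfx_aux]
  simp only [List.range_succ_eq_map, List.map_cons, List.map_map]
  simp [pvCnt, Function.comp]

theorem pvPrefixRow_get (row : List Char) (j : Nat) (hj : j ≤ row.length) :
    PySem.List.pyGetD (pvPrefixRow row) (j : Int) 0 = pvCnt (row.take j) := by
  rw [pvPrefixRow_eq]
  rw [PySem.List.pyGetD_natCast]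
  simp [List.getD_eq_getElem?_getD, List.getElem?_map, List.getElem?_range (by omega : j < row.length + 1)]

theorem pvPrefixRow_length (row : List Char) :
    (pvPrefixRow row).length = row.length + 1 := by
  simp [pvPrefixRow_eq]

-- per row: B's guarded prefix-sum difference = '#'-count of A's clamped slice
theorem pvRow_count (row : List Char) (x : Int) (hx : 0 ≤ x) :
    (if max 0 (x - 1) < min (x + 2) (((pvPrefixRow row).length : Int) - 1)
     then PySem.List.pyGetD (pvPrefixRow row) (min (x + 2) (((pvPrefixRow row).length : Int) - 1)) 0
          - PySem.List.pyGetD (pvPrefixRow row) (max 0 (x - 1)) 0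
     else 0)
    = pvCnt (PySem.List.slice row (some (max 0 (x - 1))) (some (min (x + 2) (row.length : Int)))) := by
  have hlen : (((pvPrefixRow row).length : Int) - 1) = (row.length : Int) := by
    rw [pvPrefixRow_length]; push_cast; ring
  rw [hlen]
  have hlo : (0:Int) ≤ max 0 (x - 1) := le_max_left _ _
  have hhi : (0:Int) ≤ min (x + 2) (row.length : Int) := le_min (by omega) (by positivity)
  set lo := max 0 (x - 1) with hlodef
  set hi := min (x + 2) (row.length : Int) with hhidef
  have ha : lo = (lo.toNat : Int) := (Int.toNat_of_nonneg hlo).symm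
  have hb : hi = (hi.toNat : Int) := (Int.toNat_of_nonneg hhi).symm
  have hbL : hi.toNat ≤ row.length := by
    have : hi ≤ (row.length : Int) := min_le_right _ _
    omega
  rw [PySem.List.slice_toNat row hlo hhi]
  by_cases h : lo < hi
  · rw [if_pos h, ha, hb, pvPrefixRow_get row hi.toNat hbL,
      pvPrefixRow_get row lo.toNat (by omega)]
    have hsplit : row.take hi.toNat = row.take lo.toNat ++ (row.drop lo.toNat).take (hi.toNat - lo.toNat) := by
      rw [← List.take_add, Nat.add_sub_cancel' (by omega)]
    rw [hsplit]
    simp [pvCnt, List.countP_append, max_eq_left hlo, max_eq_left hhi]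
  · rw [if_neg h]
    have : hi.toNat - lo.toNat = 0 := by omega
    rw [this]
    simp [pvCnt]

theorem pvCnt_flatMap {α β : Type} (p : β → Bool) (g : α → List β) (l : List α) :
    (List.flatMap g l).countP p = (l.map (fun a => (g a).countP p)).sum := by
  induction l with
  | nil => simp
  | cons a l ih => simp [List.countP_append, ih]

-- the neighbourhood counts of A and B agree at every cell index
theorem pvOcc_eq (grid : List String) (x y : Int) (hx : 0 ≤ x) (hy : 0 ≤ y)
    (hyn : y < (grid.length : Int)) :
    get_occupied_seats grid x y = pvOcc (pvPrefList grid) (grid.length : Int) x y := by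
  have h0 : (0:Int) ≤ max 0 (y - 1) := le_max_left _ _
  have h01 : max 0 (y - 1) ≤ min (y + 2) (grid.length : Int) := by
    apply max_le (le_min (by omega) (by omega)) (le_min (by omega) (by omega))
  have h1n : min (y + 2) (grid.length : Int) ≤ (grid.length : Int) := min_le_right _ _
  rw [get_occupied_seats, pvOcc]
  rw [PySem.List.foldl_append_eq_flatMap]
  simp only [List.nil_append]
  rw [PySem.List.foldl_add _ (fun s => if s == '#' then (1:Int) else 0)]
  rw [PySem.List.sum_map_ite_one_zero]
  rw [pvCnt_flatMap]
  rw [PySem.List.foldl_congr_mem _ _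
    (fun total r =>
      total + (if max 0 (x - 1) < min (x + 2) (((PySem.List.pyGetD (pvPrefList grid) r []).length : Int) - 1)
        then PySem.List.pyGetD (PySem.List.pyGetD (pvPrefList grid) r []) (min (x + 2) (((PySem.List.pyGetD (pvPrefList grid) r []).length : Int) - 1)) 0
           - PySem.List.pyGetD (PySem.List.pyGetD (pvPrefList grid) r []) (max 0 (x - 1)) 0
        else 0)) 0
    (by intro acc r _; dsimp only; split <;> simp)]
  rw [PySem.List.foldl_add]
  simp only [zero_add]
  rw [Nat.cast_list_sum, List.map_map]
  congr 1
  rw [PySem.List.slice_toNat grid h0 (le_trans h0 h01), PySem.List.pyRange_one, List.map_map]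
  set a := (max 0 (y - 1)).toNat with hadef
  set b := (min (y + 2) (grid.length : Int)).toNat with hbdef
  have hab : a ≤ b := by omega
  have hbn : b ≤ grid.length := by omega
  apply List.ext_getElem
  · simp; omega
  · intro k hk1 hk2
    simp only [List.getElem_map, List.getElem_take, List.getElem_drop, List.getElem_range,
      Function.comp]
    have hr : max 0 (y - 1) + (k : Int) = ((a + k : Nat) : Int) := by
      simp at hk2; push_cast; omega
    have hak : a + k < grid.length := by simp at hk2; omega
    rw [hr, PySem.List.pyGetD_natCast]
    have hget : (pvPrefList grid).getD (a + k) [] = pvPrefixRow (grid[a + k]'hak).toList := by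
      simp [pvPrefList, List.getD_eq_getElem?_getD, List.getElem?_map,
        List.getElem?_eq_getElem hak]
    rw [hget]
    rw [pvRow_count _ x hx]
    simp [pvCnt]

theorem pv_main (grid : List String) : sweep_grid grid = sweep_grid_alt grid := by
  rw [sweep_grid, sweep_grid_alt]
  rw [PySem.List.foldl_append_singleton_eq_map (fun row => pvPrefixRow row.toList) grid []]
  simp only [List.nil_append]
  rw [← pvPrefList]
  apply PySem.List.foldl_congr_mem
  intro acc yr hyr
  obtain ⟨k, hk, rfl⟩ := (PySem.List.mem_enumerate_iff _ _ _).mp hyr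
  dsimp only
  congr 2
  apply congrArg
  apply PySem.List.foldl_congr_mem
  intro acc2 xs hxs
  obtain ⟨j, hj, rfl⟩ := (PySem.List.mem_enumerate_iff _ _ _).mp hxs
  dsimp only
  rw [pvOcc_eq grid (0 + (j:Int)) (0 + (k:Int)) (by omega) (by omega) (by omega)]
  rfl

-- ===== VERDICT (by name: the statement is the Claim_ definition above) =====
theorem sweep_grid_spec : Claim_equal_sweep_grid := by
  intro grid _
  exact pv_main grid
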